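-- pv_equiv track=rewrite | github.com/OFRIN/PyTorch_Tutorials | 2. DeepLearning Tutorials/2.1. Dataset/2.1.3. Split Dataset/seperate_by_class.py | get_class_count
-- ===== SOURCE A (Python) =====
-- def get_class_count(dictionary):
--     class_dic = {}
--
--     for image_name in list(dictionary.keys()):
--         try:
--             class_dic[dictionary[image_name]] += 1
--         except KeyError:
--             class_dic[dictionary[image_name]] = 1
--
--     class_names = list(class_dic.keys())
--     return [[class_name, class_dic[class_name]] for class_name in sorted(class_names)]
-- ===== SOURCE B (Python) =====
-- def get_class_count(dictionary):
--     result = []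
--     for v in sorted(dictionary.values()):
--         if result and result[-1][0] == v:
--             result[-1][1] += 1
--         else:
--             result.append([v, 1])
--     return result
-- ===== Notes on version B (the rewrite author's own statement) =====
-- stated objective: alternative
-- what changed: Replaces A's hash-map counting pass plus sort of the distinct keys by a sort of all values followed by a single run-length grouping scan.
import Mathlib
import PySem

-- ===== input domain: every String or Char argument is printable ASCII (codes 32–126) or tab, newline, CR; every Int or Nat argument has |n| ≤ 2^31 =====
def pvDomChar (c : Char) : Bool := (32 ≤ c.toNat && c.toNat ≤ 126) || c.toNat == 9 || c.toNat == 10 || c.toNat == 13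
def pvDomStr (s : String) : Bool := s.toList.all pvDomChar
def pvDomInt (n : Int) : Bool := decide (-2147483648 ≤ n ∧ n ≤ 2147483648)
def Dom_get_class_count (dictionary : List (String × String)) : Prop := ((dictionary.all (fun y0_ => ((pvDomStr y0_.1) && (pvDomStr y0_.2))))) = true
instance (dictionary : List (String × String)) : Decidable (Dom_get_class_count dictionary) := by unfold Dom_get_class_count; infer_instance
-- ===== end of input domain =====

-- B replaces A's hash-map counting pass + sort of the distinct class names by a sort of
-- all class values followed by one run-length grouping scan (alternative algorithm, same result).

-- ===== PORT A =====
-- A's input is a Python dict; the assoc-list argument denotes the dict built from it.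
def get_class_count (dictionary : List (String × String)) : List (String × Int) :=
  let d := PySem.Dict.ofList dictionary
  -- 'for image_name in list(dictionary.keys()): try: class_dic[dictionary[image_name]] += 1 except KeyError: … = 1'
  -- 'dictionary[image_name]' cannot raise (image_name ∈ keys), so it is d.getD k ""; the
  -- try/except increment-or-initialise is exactly Dict.modify v 0 (· + 1).
  let class_dic := d.keys.foldl (fun cd k => cd.modify (d.getD k "") 0 (· + 1)) PySem.Dict.empty
  let class_names := class_dic.keys
  (PySem.List.sorted class_names (fun x => x)).map (fun c => (c, class_dic.getD c 0))

-- ===== PORT B =====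
-- loop body of Source B: append [v,1], or increment the count of the last pair when its label is v
def pvStep (res : List (String × Int)) (v : String) : List (String × Int) :=
  match res.getLast? with
  | some (v0, c) => if v0 = v then res.dropLast ++ [(v0, c + 1)] else res ++ [(v, 1)]
  | none => [(v, 1)]

def get_class_count_alt (dictionary : List (String × String)) : List (String × Int) :=
  (PySem.List.sorted (PySem.Dict.ofList dictionary).values (fun x => x)).foldl pvStep []

-- ===== PRECONDITION & SPEC =====
def Spec_get_class_count (dictionary : List (String × String)) (out : List (String × Int)) : Prop := out = get_class_count_alt dictionary
instance (dictionary : List (String × String)) (out : List (String × Int)) : Decidable (Spec_get_class_count dictionary out) := by unfold Spec_get_class_count; infer_instance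

-- ===== CLAIM (what is proved, stated in full; the proofs are below) =====
def Claim_equal_get_class_count : Prop := ∀ (dictionary : List (String × String)), Dom_get_class_count dictionary → Spec_get_class_count dictionary (get_class_count dictionary)

-- ===== LEMMAS AND PROOFS =====

-- canonical form both ports are reduced to: distinct labels (first occurrences) with counts
def pvGroups (p : List String) : List (String × Int) :=
  (PySem.List.dedup p).map (fun c => (c, (p.count c : Int)))

theorem pvFoldlAdd_sublist (l : List α) [BEq α] :
    ∀ s : List α, ∃ t, l.foldl PySem.Set.add s = s ++ t ∧ t.Sublist l := by
  induction l with
  | nil => exact fun s => ⟨[], by simp⟩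
  | cons a l ih =>
    intro s
    show ∃ t, l.foldl PySem.Set.add (PySem.Set.add s a) = s ++ t ∧ t.Sublist (a :: l)
    by_cases h : s.contains a
    · obtain ⟨t, ht, hs⟩ := ih s
      exact ⟨t, by simpa [PySem.Set.add, h] using ht, hs.cons a⟩
    · obtain ⟨t, ht, hs⟩ := ih (s ++ [a])
      exact ⟨a :: t, by simpa [PySem.Set.add, h] using ht, hs.cons₂ a⟩

theorem pvDedup_sublist (l : List α) [BEq α] : (PySem.List.dedup l).Sublist l := by
  obtain ⟨t, ht, hs⟩ := pvFoldlAdd_sublist l []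
  simpa [PySem.List.dedup_eq_ofList, PySem.Set.ofList_eq_foldl, ht] using hs

theorem pvDedup_pairwise (l : List String) (h : l.Pairwise (· ≤ ·)) :
    (PySem.List.dedup l).Pairwise (· < ·) := by
  have h1 : (PySem.List.dedup l).Pairwise (· ≤ ·) := h.sublist (pvDedup_sublist l)
  have h2 : (PySem.List.dedup l).Pairwise (· ≠ ·) := PySem.List.nodup_dedup l
  exact (h1.and h2).imp (fun ⟨hle, hne⟩ => lt_of_le_of_ne hle hne)

theorem pvLast_of_max (q : List String) (v : String) (hp : q.Pairwise (· ≤ ·))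
    (hv : v ∈ q) (hmax : ∀ x ∈ q, x ≤ v) : q.getLast? = some v := by
  induction q with
  | nil => cases hv
  | cons a q ih =>
    cases q with
    | nil => simp at hv ⊢; exact hv.symm
    | cons b q' =>
      rw [List.getLast?_cons_cons]
      have hp' := hp.of_cons
      rcases List.mem_cons.mp hv with rfl | hv'
      · -- v = a; then b = v since a ≤ b ≤ v
        have hab : v ≤ b := (List.pairwise_cons.mp hp).1 b (by simp)
        have hbv : b ≤ v := hmax b (by simp)
        have : b = v := le_antisymm hbv hab
        exact ih hp' (by simp [this]) (fun x hx => hmax x (List.mem_cons_of_mem _ hx))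
      · exact ih hp' hv' (fun x hx => hmax x (List.mem_cons_of_mem _ hx))

theorem pvDedup_append_add (p : List String) (v : String) :
    PySem.List.dedup (p ++ [v]) = PySem.Set.add (PySem.List.dedup p) v := by
  simp [PySem.List.dedup_eq_ofList, PySem.Set.ofList_eq_foldl, List.foldl_append]

theorem pvDedup_append_mem (p : List String) (v : String) (h : v ∈ p) :
    PySem.List.dedup (p ++ [v]) = PySem.List.dedup p := by
  rw [pvDedup_append_add]
  simp [PySem.Set.add, PySem.Set.contains, h]

theorem pvDedup_append_not_mem (p : List String) (v : String) (h : v ∉ p) :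
    PySem.List.dedup (p ++ [v]) = PySem.List.dedup p ++ [v] := by
  rw [pvDedup_append_add]
  simp [PySem.Set.add, PySem.Set.contains, h]

theorem pvStep_groups (p : List String) (v : String) (h : (p ++ [v]).Pairwise (· ≤ ·)) :
    pvStep (pvGroups p) v = pvGroups (p ++ [v]) := by
  have hp : p.Pairwise (· ≤ ·) := h.sublist (by simp)
  have hmax : ∀ x ∈ p, x ≤ v := by
    have := List.pairwise_append.mp h
    exact fun x hx => this.2.2 x hx v (by simp)
  by_cases hv : v ∈ p
  · -- the run of v continues: the last group's label is v, its count goes up by one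
    have hlast : (PySem.List.dedup p).getLast? = some v :=
      pvLast_of_max _ v (hp.sublist (pvDedup_sublist p))
        ((PySem.List.mem_dedup p v).mpr hv)
        (fun x hx => hmax x ((PySem.List.mem_dedup p x).mp hx))
    obtain ⟨q₀, hq⟩ := List.getLast?_eq_some_iff.mp hlast
    have hvq₀ : v ∉ q₀ := by
      have := PySem.List.nodup_dedup p
      rw [hq] at this
      exact fun hmem => (List.disjoint_of_nodup_append this) hmem (by simp)
    have hgr : pvGroups p
        = q₀.map (fun c => (c, (p.count c : Int))) ++ [(v, (p.count v : Int))] := by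
      rw [pvGroups, hq]; simp
    rw [hgr]
    unfold pvStep
    rw [List.getLast?_concat]
    dsimp only
    rw [if_pos rfl, List.dropLast_concat, pvGroups, pvDedup_append_mem p v hv, hq,
      List.map_append]
    congr 1
    · apply List.map_congr_left
      intro c hc
      have hcv : c ≠ v := fun hcv => hvq₀ (hcv ▸ hc)
      simp [List.count_append, Ne.symm hcv]
    · simp [List.count_append]
  · -- a new run of v starts: a fresh group [v, 1] is appended
    have hvcount : ((p ++ [v]).count v : Int) = 1 := by
      simp [List.count_append, List.count_eq_zero_of_not_mem hv]
    cases hdp : (PySem.List.dedup p) with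
    | nil =>
      have hgr : pvGroups p = [] := by rw [pvGroups, hdp]; simp
      rw [hgr]
      unfold pvStep
      rw [pvGroups, pvDedup_append_not_mem p v hv, hdp]
      simp [List.count_eq_zero_of_not_mem hv]
    | cons a q =>
      obtain ⟨q₀, b, hb⟩ : ∃ q₀ b, a :: q = q₀ ++ [b] :=
        ⟨(a :: q).dropLast, (a :: q).getLast (by simp),
          (List.dropLast_concat_getLast (by simp)).symm⟩
      have hbv : b ≠ v := by
        intro hbv
        have hbmem : b ∈ PySem.List.dedup p := by rw [hdp, hb]; simp
        exact hv (hbv ▸ (PySem.List.mem_dedup p b).mp hbmem)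
      have hgr : pvGroups p = (q₀.map (fun c => (c, (p.count c : Int))))
          ++ [(b, (p.count b : Int))] := by
        rw [pvGroups, hdp, hb]; simp
      rw [hgr]
      unfold pvStep
      rw [List.getLast?_concat]
      dsimp only
      rw [if_neg hbv, pvGroups, pvDedup_append_not_mem p v hv, hdp, hb, List.map_append,
        List.map_append]
      have hcount : ∀ c, c ∈ PySem.List.dedup p →
          ((p ++ [v]).count c : Int) = (p.count c : Int) := by
        intro c hc
        have hcv : c ≠ v := fun hcv => hv (hcv ▸ (PySem.List.mem_dedup p c).mp hc)
        simp [List.count_append, Ne.symm hcv]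
      have hmapeq : ∀ (r : List String), (∀ c ∈ r, c ∈ PySem.List.dedup p) →
          r.map (fun c => (c, ((p ++ [v]).count c : Int)))
            = r.map (fun c => (c, (p.count c : Int))) :=
        fun r hr => List.map_congr_left (fun c hc => by rw [hcount c (hr c hc)])
      rw [hmapeq q₀ (fun c hc => by rw [hdp, hb]; exact List.mem_append_left _ hc),
          hmapeq [b] (fun c hc => by rw [hdp, hb]; rw [List.mem_singleton] at hc; simp [hc])]
      simp [List.count_eq_zero_of_not_mem hv]

theorem pvFoldl_groups (l : List String) :
    ∀ p : List String, (p ++ l).Pairwise (· ≤ ·) → l.foldl pvStep (pvGroups p) = pvGroups (p ++ l) := by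
  induction l with
  | nil => intro p _; simp
  | cons v l ih =>
    intro p h
    have h1 : (p ++ [v]).Pairwise (· ≤ ·) :=
      h.sublist (List.Sublist.append_left (((List.nil_sublist l).cons₂ v)) p)
    rw [List.foldl_cons, pvStep_groups p v h1, ih (p ++ [v]) (by simpa using h)]
    simp

theorem pvAlt_eq_groups (dictionary : List (String × String)) :
    get_class_count_alt dictionary =
      pvGroups (PySem.List.sorted (PySem.Dict.ofList dictionary).values (fun x => x)) := by
  unfold get_class_count_alt
  have h := pvFoldl_groups (PySem.List.sorted (PySem.Dict.ofList dictionary).values (fun x => x)) []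
    (by simpa using PySem.List.sorted_pairwise (PySem.Dict.ofList dictionary).values (fun x => x))
  simpa [pvGroups] using h

theorem pvA_eq_counter_form (dictionary : List (String × String)) :
    get_class_count dictionary =
      (PySem.List.sorted (PySem.Set.ofList (PySem.Dict.ofList dictionary).values) (fun x => x)).map
        (fun c => (c, ((PySem.Dict.ofList dictionary).values.count c : Int))) := by
  unfold get_class_count
  have hnd := PySem.Dict.nodup_keys_ofList dictionary
  have hv := PySem.Dict.values_eq_map_keys (PySem.Dict.ofList dictionary) hnd ""
  have hfold : (PySem.Dict.ofList dictionary).keys.foldl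
      (fun cd k => cd.modify ((PySem.Dict.ofList dictionary).getD k "") 0 (· + 1)) PySem.Dict.empty
      = PySem.Dict.counter (PySem.Dict.ofList dictionary).values := by
    rw [PySem.Dict.counter_eq_foldl, hv, List.foldl_map]
  simp only [hfold, PySem.Dict.keys_counter]
  exact List.map_congr_left (fun c _ => by rw [PySem.Dict.getD_counter])

theorem pvSorted_set_eq_dedup_sorted (vals : List String) :
    PySem.List.sorted (PySem.Set.ofList vals) (fun x => x) =
      PySem.List.dedup (PySem.List.sorted vals (fun x => x)) := by
  apply PySem.List.sorted_eq_of_perm_of_pairwise_lt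
  · rw [List.perm_ext_iff_of_nodup (PySem.List.nodup_dedup _) (PySem.Set.nodup_ofList vals)]
    intro a
    rw [PySem.List.mem_dedup, PySem.Set.mem_ofList]
    exact ⟨fun h => (PySem.List.sorted_perm vals _ false).mem_iff.mp h,
           fun h => (PySem.List.sorted_perm vals _ false).mem_iff.mpr h⟩
  · exact pvDedup_pairwise _ (PySem.List.sorted_pairwise vals (fun x => x))

-- ===== VERDICT (by name: the statement is the Claim_ definition above) =====
theorem get_class_count_spec : Claim_equal_get_class_count := by
  intro dictionary _
  unfold Spec_get_class_count
  rw [pvA_eq_counter_form, pvAlt_eq_groups, pvGroups,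
    pvSorted_set_eq_dedup_sorted (PySem.Dict.ofList dictionary).values]
  exact List.map_congr_left (fun c _ => by
    rw [(PySem.List.sorted_perm (PySem.Dict.ofList dictionary).values (fun x => x) false).count_eq])
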